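-- pv_equiv track=rewrite | github.com/fras2560/research | graph/colorable.py | unlabeled_balls_in_unlabeled_boxe
-- ===== SOURCE A (Python) =====
-- def unlabeled_balls_in_unlabeled_boxe(balls, box_sizes):
--     '''
--     @author Dr. Phillip M. Feldman
--     '''
--     if not balls:
--         yield len(box_sizes) * (0,)
--     elif len(box_sizes) == 1:
--         if box_sizes[0] >= balls:
--             yield (balls,)
--     else:
--         for balls_in_first_box in range( min(balls, box_sizes[0]), -1, -1 ):
--             balls_in_other_boxes = balls - balls_in_first_box
--             short = unlabeled_balls_in_unlabeled_boxe
--             for distribution_other in short(balls_in_other_boxes,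
--                                             box_sizes[1:]):
--                 if distribution_other[0] <= balls_in_first_box:
--                     yield (balls_in_first_box,) + distribution_other
-- ===== SOURCE B (Python) =====
-- def unlabeled_balls_in_unlabeled_boxe(balls, box_sizes):
--     # Threads the running cap (balls placed in the previous box) into the
--     # recursion, so every branch explored is a valid non-increasing
--     # distribution: no generate-then-filter of sub-distributions.
--     if balls == 0:
--         yield len(box_sizes) * (0,)
--         return
--     def go(n, sizes, cap):
--         if n == 0:
--             yield len(sizes) * (0,)
--             return
--         if not sizes:
--             return
--         for k in range(min(min(n, sizes[0]), cap), -1, -1):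
--             for rest in go(n - k, sizes[1:], k):
--                 yield (k,) + rest
--     yield from go(balls, box_sizes, balls)
-- ===== Notes on version B (the rewrite author's own statement) =====
-- stated objective: alternative
-- what changed: B threads an upper bound (the count placed in the previous box) into the recursion so only valid non-increasing branches are generated, instead of A's generating every sub-distribution and filtering out those whose first entry exceeds the current box's count.
-- intended difference: On negative balls with exactly one box whose size is >= balls, A yields the impossible tuple (balls,) with a negative count while B yields no distributions, which is the intended result since a box cannot hold a negative number of balls. — e.g. on unlabeled_balls_in_unlabeled_boxe(-1, [0]): A returns [[-1]], B returns []
import Mathlib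
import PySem

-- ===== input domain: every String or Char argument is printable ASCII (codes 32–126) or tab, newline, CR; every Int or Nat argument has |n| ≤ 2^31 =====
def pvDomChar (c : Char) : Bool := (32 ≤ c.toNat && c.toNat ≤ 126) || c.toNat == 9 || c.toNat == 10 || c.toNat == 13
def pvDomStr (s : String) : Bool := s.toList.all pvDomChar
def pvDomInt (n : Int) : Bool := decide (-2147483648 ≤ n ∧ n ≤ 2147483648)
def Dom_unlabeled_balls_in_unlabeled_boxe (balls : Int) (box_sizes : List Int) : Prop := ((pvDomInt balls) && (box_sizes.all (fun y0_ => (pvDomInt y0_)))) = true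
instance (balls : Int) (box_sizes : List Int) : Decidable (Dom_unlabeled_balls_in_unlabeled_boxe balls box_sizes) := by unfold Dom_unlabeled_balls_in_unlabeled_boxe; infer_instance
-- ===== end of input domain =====

-- B prunes with a threaded upper bound instead of A's generate-then-filter recursion;
-- the generators are compared by their yielded sequences.

-- ===== PORT A =====
-- Literal port of A; the generator's yields are collected in order into a list.
def unlabeled_balls_in_unlabeled_boxe (balls : Int) (box_sizes : List Int) : List (List Int) :=
  if balls = 0 then
    [List.replicate box_sizes.length 0]
  else
    match box_sizes with
    | [] => []          -- Python raises IndexError here (box_sizes[0] in the else branch); outside Pre_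
    | [b] => if b ≥ balls then [[balls]] else []
    | s0 :: s1 :: rest =>
      (PySem.List.pyRange (min balls s0) (-1) (-1)).flatMap (fun k =>
        (unlabeled_balls_in_unlabeled_boxe (balls - k) (s1 :: rest)).flatMap (fun d =>
          match d with
          | [] => []    -- unreachable: recursive results are nonempty (Python would raise on d[0])
          | x :: _ => if x ≤ k then [k :: d] else []))
termination_by box_sizes.length
decreasing_by simp

-- ===== PORT B =====
-- Literal port of Source B's inner generator `go`: the cap is the count placed in the previous box.
def pvGo (n : Int) (sizes : List Int) (cap : Int) : List (List Int) :=
  if n = 0 then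
    [List.replicate sizes.length 0]
  else
    match sizes with
    | [] => []
    | s :: rest =>
      (PySem.List.pyRange (min (min n s) cap) (-1) (-1)).flatMap (fun k =>
        (pvGo (n - k) rest k).map (fun d => k :: d))
termination_by sizes.length
decreasing_by simp

def unlabeled_balls_in_unlabeled_boxe_alt (balls : Int) (box_sizes : List Int) : List (List Int) :=
  if balls = 0 then
    [List.replicate box_sizes.length 0]
  else
    pvGo balls box_sizes balls

-- ===== PRECONDITION & SPEC =====
-- Pre_ excludes exactly the inputs where the Python A raises (IndexError on box_sizes[0]
-- when balls ≠ 0 and box_sizes is empty).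
def Pre_unlabeled_balls_in_unlabeled_boxe (balls : Int) (box_sizes : List Int) : Prop :=
  balls = 0 ∨ box_sizes ≠ []
instance (balls : Int) (box_sizes : List Int) : Decidable (Pre_unlabeled_balls_in_unlabeled_boxe balls box_sizes) := by unfold Pre_unlabeled_balls_in_unlabeled_boxe; infer_instance

def pvWitness_unlabeled_balls_in_unlabeled_boxe : Int × List Int := (3, [2, 2])

-- On negative balls with exactly one box whose size is ≥ balls, A yields the impossible tuple
-- (balls,) with a negative count; B yields no distributions, the intended result since a box
-- cannot hold a negative number of balls.
def D_unlabeled_balls_in_unlabeled_boxe (balls : Int) (box_sizes : List Int) : Prop :=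
  balls < 0 ∧ box_sizes.length = 1 ∧ balls ≤ box_sizes.headD 0
instance (balls : Int) (box_sizes : List Int) : Decidable (D_unlabeled_balls_in_unlabeled_boxe balls box_sizes) := by unfold D_unlabeled_balls_in_unlabeled_boxe; infer_instance

def Spec_unlabeled_balls_in_unlabeled_boxe (balls : Int) (box_sizes : List Int) (out : List (List Int)) : Prop := ¬ D_unlabeled_balls_in_unlabeled_boxe balls box_sizes → out = unlabeled_balls_in_unlabeled_boxe_alt balls box_sizes
instance (balls : Int) (box_sizes : List Int) (out : List (List Int)) : Decidable (Spec_unlabeled_balls_in_unlabeled_boxe balls box_sizes out) := by unfold Spec_unlabeled_balls_in_unlabeled_boxe; infer_instance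

def pvDiffWitness_unlabeled_balls_in_unlabeled_boxe : Int × List Int := (-1, [0])
def pvDiffWitnessOut_unlabeled_balls_in_unlabeled_boxe : (List (List Int)) × (List (List Int)) := ([[-1]], [])

-- ===== CLAIM (what is proved, stated in full; the proofs are below) =====
def Claim_unchanged_unlabeled_balls_in_unlabeled_boxe : Prop := ∀ (balls : Int) (box_sizes : List Int), Dom_unlabeled_balls_in_unlabeled_boxe balls box_sizes → Pre_unlabeled_balls_in_unlabeled_boxe balls box_sizes → Spec_unlabeled_balls_in_unlabeled_boxe balls box_sizes (unlabeled_balls_in_unlabeled_boxe balls box_sizes)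
def Claim_changed_unlabeled_balls_in_unlabeled_boxe : Prop := Dom_unlabeled_balls_in_unlabeled_boxe (pvDiffWitness_unlabeled_balls_in_unlabeled_boxe.1) (pvDiffWitness_unlabeled_balls_in_unlabeled_boxe.2) ∧ Pre_unlabeled_balls_in_unlabeled_boxe (pvDiffWitness_unlabeled_balls_in_unlabeled_boxe.1) (pvDiffWitness_unlabeled_balls_in_unlabeled_boxe.2) ∧ D_unlabeled_balls_in_unlabeled_boxe (pvDiffWitness_unlabeled_balls_in_unlabeled_boxe.1) (pvDiffWitness_unlabeled_balls_in_unlabeled_boxe.2) ∧ unlabeled_balls_in_unlabeled_boxe (pvDiffWitness_unlabeled_balls_in_unlabeled_boxe.1) (pvDiffWitness_unlabeled_balls_in_unlabeled_boxe.2) = pvDiffWitnessOut_unlabeled_balls_in_unlabeled_boxe.1 ∧ unlabeled_balls_in_unlabeled_boxe_alt (pvDiffWitness_unlabeled_balls_in_unlabeled_boxe.1) (pvDiffWitness_unlabeled_balls_in_unlabeled_boxe.2) = pvDiffWitnessOut_unlabeled_balls_in_unlabeled_boxe.2 ∧ pvDiffWitnessOut_unlabeled_balls_in_unlabeled_boxe.1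 ≠ pvDiffWitnessOut_unlabeled_balls_in_unlabeled_boxe.2
def Claim_exact_unlabeled_balls_in_unlabeled_boxe : Prop := ∀ (balls : Int) (box_sizes : List Int), Dom_unlabeled_balls_in_unlabeled_boxe balls box_sizes → Pre_unlabeled_balls_in_unlabeled_boxe balls box_sizes → D_unlabeled_balls_in_unlabeled_boxe balls box_sizes → unlabeled_balls_in_unlabeled_boxe balls box_sizes ≠ unlabeled_balls_in_unlabeled_boxe_alt balls box_sizes

-- ===== LEMMAS AND PROOFS =====

-- Every tuple A yields is nonempty and its head is at most n (the ball count).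
lemma pvA_head (n : Int) (sizes : List Int) (hs : sizes ≠ [])
    (d : List Int) (hd : d ∈ unlabeled_balls_in_unlabeled_boxe n sizes) :
    d ≠ [] ∧ d.headD 0 ≤ n := by
  match sizes with
  | [] => exact absurd rfl hs
  | [b] =>
    rw [unlabeled_balls_in_unlabeled_boxe.eq_def] at hd
    by_cases hn : n = 0
    · simp [hn] at hd
      subst hd; simp [hn]
    · simp [hn] at hd
      obtain ⟨h1, h2⟩ := hd
      subst h2
      simp
  | s0 :: s1 :: rest =>
    rw [unlabeled_balls_in_unlabeled_boxe.eq_def] at hd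
    by_cases hn : n = 0
    · simp [hn, List.replicate_succ] at hd
      subst hd; simp [hn]
    · simp only [hn, if_false, List.mem_flatMap] at hd
      obtain ⟨k, hk, d', hd', hm⟩ := hd
      have hk' : -1 < k ∧ k ≤ min n s0 := (PySem.List.mem_pyRange_neg_one).1 hk
      match d' with
      | [] => simp at hm
      | x :: t =>
        simp only [] at hm
        split at hm <;> simp at hm
        subst hm
        refine ⟨by simp, ?_⟩
        simp
        omega

-- generate-then-filter of nonempty tuples = filter-then-prepend
lemma pvInner (k : Int) (L : List (List Int)) (hL : ∀ d ∈ L, d ≠ []) :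
    (L.flatMap (fun d =>
      match d with
      | [] => []
      | x :: _ => if x ≤ k then [k :: d] else []))
    = (L.filter (fun d => decide (d.headD 0 ≤ k))).map (fun d => k :: d) := by
  induction L with
  | nil => simp
  | cons d L ih =>
    have hd : d ≠ [] := hL d (by simp)
    have ih' := ih (fun d' hd' => hL d' (by simp [hd']))
    match d with
    | x :: t =>
      simp only [List.flatMap_cons, List.filter_cons, ih']
      by_cases hx : x ≤ k <;> simp [hx]

-- a head-bounded filter over a countdown range truncates the range
lemma pvTrunc (cap : Int) (hcap : 0 ≤ cap) (f : Int → List (List Int)) (m : Int) :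
    (PySem.List.pyRange m (-1) (-1)).flatMap (fun k => if k ≤ cap then f k else [])
    = (PySem.List.pyRange (min m cap) (-1) (-1)).flatMap f := by
  have H : ∀ (N : Nat) (m : Int), m ≤ (N : Int) →
      (PySem.List.pyRange m (-1) (-1)).flatMap (fun k => if k ≤ cap then f k else [])
      = (PySem.List.pyRange (min m cap) (-1) (-1)).flatMap f := by
    intro N
    induction N with
    | zero =>
      intro m hm
      by_cases h0 : m < 0
      · rw [PySem.List.pyRange_neg_one_eq_nil (by omega), PySem.List.pyRange_neg_one_eq_nil (by omega)]
        simp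
      · have hm0 : m = 0 := by omega
        subst hm0
        have hmin : min (0 : Int) cap = 0 := by omega
        rw [hmin, PySem.List.pyRange_neg_one_cons (by omega), PySem.List.pyRange_neg_one_eq_nil (by omega)]
        simp [hcap]
    | succ N ih =>
      intro m hm
      by_cases hsm : m ≤ (N : Int)
      · exact ih m hsm
      · have hmpos : 0 ≤ m := by omega
        have hcons : PySem.List.pyRange m (-1) (-1) = m :: PySem.List.pyRange (m - 1) (-1) (-1) :=
          PySem.List.pyRange_neg_one_cons (by omega)
        by_cases hmc : m ≤ cap
        · have h1 : min m cap = m := by omega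
          have h2 : min (m - 1) cap = m - 1 := by omega
          rw [h1, hcons]
          simp only [List.flatMap_cons, if_pos hmc]
          rw [ih (m - 1) (by omega), h2]
        · have h1 : min m cap = cap := by omega
          have h2 : min (m - 1) cap = cap := by omega
          rw [h1, hcons]
          simp only [List.flatMap_cons, if_neg hmc, List.nil_append]
          rw [ih (m - 1) (by omega), h2]
  exact H (max m 0).toNat m (by omega)

-- single-box countdown for pvGo
lemma pvSingle (n : Int) (hn : 0 < n) (m : Int) (hm : m ≤ n) :
    (PySem.List.pyRange m (-1) (-1)).flatMap (fun k => (pvGo (n - k) [] k).map (fun d => k :: d))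
    = if n ≤ m then [[n]] else [] := by
  have H : ∀ (N : Nat) (m : Int), m ≤ (N : Int) → m ≤ n →
      (PySem.List.pyRange m (-1) (-1)).flatMap (fun k => (pvGo (n - k) [] k).map (fun d => k :: d))
      = if n ≤ m then [[n]] else [] := by
    intro N
    induction N with
    | zero =>
      intro m hmN hmn
      by_cases h0 : m < 0
      · rw [PySem.List.pyRange_neg_one_eq_nil (by omega)]
        simp
        omega
      · have hm0 : m = 0 := by omega
        subst hm0
        rw [PySem.List.pyRange_neg_one_cons (by omega), PySem.List.pyRange_neg_one_eq_nil (by omega)]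
        simp only [List.flatMap_cons, List.flatMap_nil, List.append_nil]
        rw [pvGo.eq_def]
        simp [show ¬ (n = 0) by omega, show ¬ (n ≤ 0) by omega]
    | succ N ih =>
      intro m hmN hmn
      by_cases hsm : m ≤ (N : Int)
      · exact ih m hsm hmn
      · have hmpos : 0 ≤ m := by omega
        rw [PySem.List.pyRange_neg_one_cons (by omega)]
        simp only [List.flatMap_cons]
        rw [ih (m - 1) (by omega) (by omega)]
        by_cases hnm : n = m
        · subst hnm
          rw [pvGo.eq_def]
          simp
        · rw [pvGo.eq_def]
          have hne : ¬ (n - m = 0) := by omega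
          simp [hne, show ¬ n ≤ m by omega, show ¬ n ≤ m - 1 by omega]
  exact H (max m 0).toNat m (by omega) hm

-- MAIN: the capped recursion computes exactly A's output filtered by head ≤ cap
lemma pvMain (sizes : List Int) (n cap : Int) (hs : sizes ≠ []) (hn : 0 ≤ n) (hcap : 0 ≤ cap) :
    pvGo n sizes cap
    = (unlabeled_balls_in_unlabeled_boxe n sizes).filter (fun d => decide (d.headD 0 ≤ cap)) := by
  induction sizes generalizing n cap with
  | nil => exact absurd rfl hs
  | cons s rest ih =>
    by_cases hn0 : n = 0
    · subst hn0
      rw [pvGo.eq_def, unlabeled_balls_in_unlabeled_boxe.eq_def]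
      simp [List.replicate_succ, hcap]
    · have hnpos : 0 < n := by omega
      cases rest with
      | nil =>
        rw [pvGo.eq_def, unlabeled_balls_in_unlabeled_boxe.eq_def]
        simp only [hn0, if_false]
        rw [pvSingle n hnpos _ (by omega)]
        by_cases h2 : n ≤ s <;> by_cases h3 : n ≤ cap
        · simp [h2, h3, ge_iff_le]
        · simp [h2, h3, ge_iff_le]
        · simp [h2, ge_iff_le]
        · simp [h2, ge_iff_le]
      | cons s1 r2 =>
        rw [pvGo.eq_def, unlabeled_balls_in_unlabeled_boxe.eq_def]
        simp only [hn0, if_false]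
        rw [List.filter_flatMap]
        have step : ∀ k ∈ PySem.List.pyRange (min n s) (-1) (-1),
            ((unlabeled_balls_in_unlabeled_boxe (n - k) (s1 :: r2)).flatMap (fun d =>
              match d with
              | [] => ([] : List (List Int))
              | x :: _ => if x ≤ k then [k :: d] else [])).filter (fun d => decide (d.headD 0 ≤ cap))
            = if k ≤ cap then (pvGo (n - k) (s1 :: r2) k).map (fun d => k :: d) else [] := by
          intro k hk
          have hk' : -1 < k ∧ k ≤ min n s := (PySem.List.mem_pyRange_neg_one).1 hk
          rw [pvInner k _ (fun d hd => (pvA_head (n - k) (s1 :: r2) (by simp) d hd).1)]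
          rw [List.filter_map]
          have hpred : ((fun d => decide (List.headD d 0 ≤ cap)) ∘ (fun d => k :: d))
              = fun d => decide (k ≤ cap) := by
            funext d; simp
          rw [hpred]
          by_cases hkc : k ≤ cap
          · rw [if_pos hkc]
            simp only [hkc, decide_true, List.filter_true]
            rw [ih (n - k) k (by simp) (by omega) (by omega)]
          · simp [hkc]
        rw [List.flatMap_congr step, pvTrunc cap hcap _ (min n s)]

-- ===== VERDICT (by name: the statement is the Claim_ definition above) =====
theorem unlabeled_balls_in_unlabeled_boxe_spec : Claim_unchanged_unlabeled_balls_in_unlabeled_boxe := by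
  intro balls bs _ hpre hnD
  by_cases hb0 : balls = 0
  · subst hb0
    rw [unlabeled_balls_in_unlabeled_boxe.eq_def, unlabeled_balls_in_unlabeled_boxe_alt]
    simp
  · have hbs : bs ≠ [] := by
      rcases hpre with h | h
      · exact absurd h hb0
      · exact h
    rw [unlabeled_balls_in_unlabeled_boxe_alt, if_neg hb0]
    by_cases hbp : 0 < balls
    · rw [pvMain bs balls balls hbs (by omega) (by omega)]
      symm
      rw [List.filter_eq_self]
      intro d hd
      have := (pvA_head balls bs hbs d hd).2
      simpa using this
    · -- balls < 0
      have hneg : balls < 0 := by omega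
      cases bs with
      | nil => exact absurd rfl hbs
      | cons b rest =>
        cases rest with
        | nil =>
          have hbb : b < balls := by
            by_contra h
            exact hnD ⟨hneg, by simp, by simp; omega⟩
          rw [unlabeled_balls_in_unlabeled_boxe.eq_def, pvGo.eq_def]
          simp only [hb0, if_false]
          rw [PySem.List.pyRange_neg_one_eq_nil (by omega)]
          simp
          omega
        | cons b1 r2 =>
          rw [unlabeled_balls_in_unlabeled_boxe.eq_def, pvGo.eq_def]
          simp only [hb0, if_false]
          rw [PySem.List.pyRange_neg_one_eq_nil (by omega), PySem.List.pyRange_neg_one_eq_nil (by omega)]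
          simp

theorem unlabeled_balls_in_unlabeled_boxe_changed : Claim_changed_unlabeled_balls_in_unlabeled_boxe := by
  unfold Claim_changed_unlabeled_balls_in_unlabeled_boxe
  refine ⟨by decide, by decide, by decide, ?_, ?_, by decide⟩
  · show unlabeled_balls_in_unlabeled_boxe (-1) [0] = [[-1]]
    rw [unlabeled_balls_in_unlabeled_boxe.eq_def]
    norm_num
  · show unlabeled_balls_in_unlabeled_boxe_alt (-1) [0] = []
    rw [unlabeled_balls_in_unlabeled_boxe_alt]
    norm_num
    rw [pvGo.eq_def]
    norm_num [PySem.List.pyRange_neg_one_eq_nil]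

theorem unlabeled_balls_in_unlabeled_boxe_tight : Claim_exact_unlabeled_balls_in_unlabeled_boxe := by
  intro balls bs _ _ hD
  obtain ⟨hneg, hlen, hhead⟩ := hD
  cases bs with
  | nil => simp at hlen
  | cons b rest =>
    cases rest with
    | nil =>
      simp at hhead
      have hb0 : ¬ (balls = 0) := by omega
      rw [unlabeled_balls_in_unlabeled_boxe.eq_def, unlabeled_balls_in_unlabeled_boxe_alt, if_neg hb0]
      rw [pvGo.eq_def]
      simp only [hb0, if_false]
      rw [PySem.List.pyRange_neg_one_eq_nil (by omega)]
      have : b ≥ balls := hhead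
      simp [this]
    | cons b1 r2 => simp at hlen
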